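-- pv_equiv track=rewrite | github.com/saurabh-pandey/padhaai | .githooks/prepare-commit-msg.py | construct_prefix
-- ===== SOURCE A (Python) =====
-- from typing import Optional, List, Any
--
-- def construct_prefix(changed_files: List[str], config: dict) -> tuple:
--     prefixes = ["", "", ""]
--     for f in changed_files:
--         path_parts = f.split('/')
--         if len(path_parts) == 1:
--             prefixes[0] = "PADHAAI"
--         elif len(path_parts) == 2:
--             if path_parts[0] in config["commitPrefix"]:
--                 prefixes[1] = config["commitPrefix"][path_parts[0]]
--             else:
--                 prefixes[0] = "PADHAAI"
--         else:
--             if path_parts[0] in config["commitPrefix"]: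
--                 prefixes[2] = config["commitPrefix"][path_parts[0]] + "-" + path_parts[1].upper()
--             else:
--                 prefixes[0] = "PADHAAI"
--     return tuple(prefixes)
-- ===== SOURCE B (Python) =====
-- def construct_prefix(changed_files, config):
--     parts = [f.split('/') for f in changed_files]
--     p0 = "PADHAAI" if any(len(p) == 1 or p[0] not in config["commitPrefix"] for p in parts) else ""
--     p1 = next((config["commitPrefix"][p[0]] for p in reversed(parts)
--                if len(p) == 2 and p[0] in config["commitPrefix"]), "")
--     p2 = next((config["commitPrefix"][p[0]] + "-" + p[1].upper() for p in reversed(parts)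
--                if len(p) >= 3 and p[0] in config["commitPrefix"]), "")
--     return (p0, p1, p2)
-- ===== Notes on version B (the rewrite author's own statement) =====
-- stated objective: alternative
-- what changed: Instead of one loop threading a mutable three-slot list, B computes each slot independently: an any-pass for the PADHAAI slot and a reversed-search (last qualifying file wins) for each of the other two slots.
import Mathlib
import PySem

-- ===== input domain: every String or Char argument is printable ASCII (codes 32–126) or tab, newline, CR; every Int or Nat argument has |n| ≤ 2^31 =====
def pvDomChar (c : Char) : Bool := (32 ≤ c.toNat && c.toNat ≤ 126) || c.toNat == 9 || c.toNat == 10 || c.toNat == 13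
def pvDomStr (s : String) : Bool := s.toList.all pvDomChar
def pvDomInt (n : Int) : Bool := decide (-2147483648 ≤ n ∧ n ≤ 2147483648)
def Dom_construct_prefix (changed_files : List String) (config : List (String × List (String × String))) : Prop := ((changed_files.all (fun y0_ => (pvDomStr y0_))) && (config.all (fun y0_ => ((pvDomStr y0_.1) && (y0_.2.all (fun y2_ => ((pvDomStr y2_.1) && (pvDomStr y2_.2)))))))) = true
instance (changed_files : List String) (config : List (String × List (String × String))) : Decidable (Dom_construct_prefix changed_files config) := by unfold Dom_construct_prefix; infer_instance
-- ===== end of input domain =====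

-- B computes the three prefix slots independently (an any-pass for slot 0, a last-qualifying search for slots 1 and 2) instead of one stateful loop; objective: alternative decomposition, same cost.

-- ===== PORT A =====
def construct_prefix (changed_files : List String) (config : List (String × List (String × String))) : String × String × String :=
  changed_files.foldl (fun pr f =>
    let pp := (PySem.Str.split? f "/").getD []   -- f.split('/'); sep "/" ≠ "" so split? is always `some`
    let cp := ((config.find? (fun e => e.1 == "commitPrefix")).map Prod.snd).getD []   -- config["commitPrefix"]; under Pre_ the key exists whenever this loop touches it
    if pp.length = 1 then
      ("PADHAAI", pr.2.1, pr.2.2)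
    else if pp.length = 2 then
      match (cp.find? (fun e => e.1 == pp.headD "")).map Prod.snd with
      | some v => (pr.1, v, pr.2.2)
      | none   => ("PADHAAI", pr.2.1, pr.2.2)
    else
      match (cp.find? (fun e => e.1 == pp.headD "")).map Prod.snd with
      | some v => (pr.1, pr.2.1, v ++ "-" ++ PySem.Str.upper (pp.getD 1 ""))
      | none   => ("PADHAAI", pr.2.1, pr.2.2)) ("", "", "")

-- ===== PORT B (three independent slot computations, after Source B) =====
def construct_prefix_alt (changed_files : List String) (config : List (String × List (String × String))) : String × String × String :=
  let parts := changed_files.map (fun f => (PySem.Str.split? f "/").getD [])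
  let cp := ((config.find? (fun e => e.1 == "commitPrefix")).map Prod.snd).getD []
  let p0 := if parts.any (fun p => p.length == 1 || !(cp.find? (fun e => e.1 == p.headD "")).isSome)
            then "PADHAAI" else ""
  let p1 := match parts.reverse.find? (fun p => p.length == 2 && (cp.find? (fun e => e.1 == p.headD "")).isSome) with
            | some p => ((cp.find? (fun e => e.1 == p.headD "")).map Prod.snd).getD ""
            | none => ""
  let p2 := match parts.reverse.find? (fun p => decide (3 ≤ p.length) && (cp.find? (fun e => e.1 == p.headD "")).isSome) with
            | some p => ((cp.find? (fun e => e.1 == p.headD "")).map Prod.snd).getD "" ++ "-" ++ PySem.Str.upper (p.getD 1 "")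
            | none => ""
  (p0, p1, p2)

-- ===== PRECONDITION & SPEC =====
-- Pre_ excludes exactly the inputs where Python A raises KeyError: some changed file has ≥ 2 path parts while config has no "commitPrefix" key.
def Pre_construct_prefix (changed_files : List String) (config : List (String × List (String × String))) : Prop :=
  (∀ f ∈ changed_files, ((PySem.Str.split? f "/").getD []).length = 1) ∨ "commitPrefix" ∈ config.map Prod.fst
instance (changed_files : List String) (config : List (String × List (String × String))) : Decidable (Pre_construct_prefix changed_files config) := by unfold Pre_construct_prefix; infer_instance

def pvWitness_construct_prefix : List String × (List (String × List (String × String))) :=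
  (["docs/readme.md", "setup.py", "src/core/main.py"], [("commitPrefix", [("docs", "DOC"), ("src", "SRC")])])

def Spec_construct_prefix (changed_files : List String) (config : List (String × List (String × String))) (out : String × String × String) : Prop := out = construct_prefix_alt changed_files config
instance (changed_files : List String) (config : List (String × List (String × String))) (out : String × String × String) : Decidable (Spec_construct_prefix changed_files config out) := by unfold Spec_construct_prefix; infer_instance

-- ===== CLAIM (what is proved, stated in full; the proofs are below) =====
def Claim_equal_construct_prefix : Prop := ∀ (changed_files : List String) (config : List (String × List (String × String))), Dom_construct_prefix changed_files config → Pre_construct_prefix changed_files config → Spec_construct_prefix changed_files config (construct_prefix changed_files config)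

-- ===== LEMMAS AND PROOFS =====

-- A's loop body, lifted to act on the already-split path parts
def pvStep (cp : List (String × String)) (pr : String × String × String) (pp : List String) : String × String × String :=
  if pp.length = 1 then
    ("PADHAAI", pr.2.1, pr.2.2)
  else if pp.length = 2 then
    match (cp.find? (fun e => e.1 == pp.headD "")).map Prod.snd with
    | some v => (pr.1, v, pr.2.2)
    | none   => ("PADHAAI", pr.2.1, pr.2.2)
  else
    match (cp.find? (fun e => e.1 == pp.headD "")).map Prod.snd with
    | some v => (pr.1, pr.2.1, v ++ "-" ++ PySem.Str.upper (pp.getD 1 ""))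
    | none   => ("PADHAAI", pr.2.1, pr.2.2)

-- B's three slots, as a function of the already-split path parts
def pvSlots (cp : List (String × String)) (parts : List (List String)) : String × String × String :=
  ((if parts.any (fun p => p.length == 1 || !(cp.find? (fun e => e.1 == p.headD "")).isSome) then "PADHAAI" else ""),
   (match parts.reverse.find? (fun p => p.length == 2 && (cp.find? (fun e => e.1 == p.headD "")).isSome) with
    | some p => ((cp.find? (fun e => e.1 == p.headD "")).map Prod.snd).getD ""
    | none => ""),
   (match parts.reverse.find? (fun p => decide (3 ≤ p.length) && (cp.find? (fun e => e.1 == p.headD "")).isSome) with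
    | some p => ((cp.find? (fun e => e.1 == p.headD "")).map Prod.snd).getD "" ++ "-" ++ PySem.Str.upper (p.getD 1 "")
    | none => ""))

lemma pvGo_ne_nil (sep : List Char) (fuel : Nat) :
    ∀ l cur acc, PySem.Chars.splitOn.go sep fuel l cur acc ≠ [] := by
  induction fuel with
  | zero => intro l cur acc; simp [PySem.Chars.splitOn.go]
  | succ n ih =>
    intro l cur acc
    cases l with
    | nil => simp [PySem.Chars.splitOn.go]
    | cons c rest =>
      simp only [PySem.Chars.splitOn.go]
      split_ifs <;> apply ih

lemma pvSplit_ne_nil (f : String) : (PySem.Str.split? f "/").getD [] ≠ [] := by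
  simp [PySem.Str.split?, PySem.Chars.split?, PySem.Chars.splitOn, List.map_eq_nil_iff]
  exact pvGo_ne_nil _ _ _ _ _

lemma pvCore (cp : List (String × String)) (parts : List (List String))
    (h : ∀ p ∈ parts, p ≠ []) :
    parts.foldl (pvStep cp) ("", "", "") = pvSlots cp parts := by
  induction parts using List.reverseRecOn with
  | nil => rfl
  | append_singleton l x ih =>
    have hx : x ≠ [] := h x (by simp)
    have hx0 : x.length ≠ 0 := by simpa using hx
    rw [List.foldl_append, List.foldl_cons, List.foldl_nil,
      ih (fun p hp => h p (by simp [hp]))]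
    unfold pvSlots pvStep
    rw [List.reverse_append]
    simp only [List.reverse_cons, List.reverse_nil, List.nil_append, List.cons_append,
      List.any_append, List.any_cons, List.any_nil, List.find?_cons, Bool.or_false,
      List.headD_eq_head?_getD]
    by_cases h1 : x.length = 1
    · simp [h1]
    · by_cases h2 : x.length = 2
      · have b1 : (x.length == 1) = false := by simp [h1]
        rcases hfind : cp.find? (fun e => e.1 == x.head?.getD "") with _ | ⟨a, v⟩
        · simp [h2, hfind]
        · simp only [hfind, h2, Option.isSome_some, Bool.not_true, Bool.or_false, Option.map_some]
          simp_all
          exact if_congr (by simp) rfl rfl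
      · have h3 : (3:Nat) ≤ x.length := by omega
        have b1 : (x.length == 1) = false := by simp [h1]
        have b2 : (x.length == 2) = false := by simp [h2]
        rcases hfind : cp.find? (fun e => e.1 == x.head?.getD "") with _ | ⟨a, v⟩ <;>
        · simp only [hfind, b1, b2, Option.isSome_some, Bool.not_true, Bool.or_false, Option.map_some]
          simp_all

lemma pvA_eq (changed_files : List String) (config : List (String × List (String × String))) :
    construct_prefix changed_files config =
      (changed_files.map (fun f => (PySem.Str.split? f "/").getD [])).foldl
        (pvStep (((config.find? (fun e => e.1 == "commitPrefix")).map Prod.snd).getD [])) ("", "", "") := by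
  rw [List.foldl_map]; rfl

lemma pvB_eq (changed_files : List String) (config : List (String × List (String × String))) :
    construct_prefix_alt changed_files config =
      pvSlots (((config.find? (fun e => e.1 == "commitPrefix")).map Prod.snd).getD [])
        (changed_files.map (fun f => (PySem.Str.split? f "/").getD [])) := by
  rfl

-- ===== VERDICT (by name: the statement is the Claim_ definition above) =====
theorem construct_prefix_spec : Claim_equal_construct_prefix := by
  intro changed_files config _ _
  unfold Spec_construct_prefix
  rw [pvA_eq, pvB_eq, pvCore]
  intro p hp
  rcases List.mem_map.mp hp with ⟨f, _, rfl⟩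
  exact pvSplit_ne_nil f
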